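-- pv_equiv track=rewrite | github.com/pay-me-for-the-lab/AOIS-2023-1sem | LAB1/main.py | additional_to_straight
-- ===== SOURCE A (Python) =====
-- def additional_to_straight(binary, negative_number):
--     temp = binary[1:]
--     if negative_number:
--         straight = "1"
--     else:
--         straight = "0"
--     for number in temp:
--         if number == "1":
--             straight += "0"
--         else:
--             straight += "1"
--     temp = [int(number) for number in straight[1:]]
--     temp.reverse()
--     plus = True
--     counter = 0
--     for number in temp:
--         if plus:
--             if number == 0:
--                 temp[counter] += 1
--                 break
--             elif number == 1:
--                 temp[counter] -= 1
--                 counter += 1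
--                 if len(temp) < counter:
--                     temp[counter] += 1
--                     plus = False
--         else:
--             if number == 2:
--                 temp[counter] -= 2
--                 counter += 1
--                 if len(temp) < counter:
--                     temp[counter] += 1
--     temp.reverse()
--     straight = straight[0]
--     for number in temp:
--         straight += str(number)
--     return straight
-- ===== SOURCE B (Python) =====
-- def additional_to_straight(binary, negative_number):
--     sign = "1" if negative_number else "0"
--     rest = binary[1:]
--     if not rest:
--         return sign
--     inverted = ''.join('0' if c == '1' else '1' for c in rest)
--     n = len(inverted)
--     value = (int(inverted, 2) + 1) % (1 << n)
--     return sign + format(value, '0{}b'.format(n))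
-- ===== Notes on version B (the rewrite author's own statement) =====
-- stated objective: simpler
-- what changed: Replaced A's bit-inversion string fold plus manual LSB-first ripple-increment loop with mutation and index bookkeeping by closed-form integer arithmetic: (int(inverted,2)+1) mod 2^n, rendered back with format.
import Mathlib
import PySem

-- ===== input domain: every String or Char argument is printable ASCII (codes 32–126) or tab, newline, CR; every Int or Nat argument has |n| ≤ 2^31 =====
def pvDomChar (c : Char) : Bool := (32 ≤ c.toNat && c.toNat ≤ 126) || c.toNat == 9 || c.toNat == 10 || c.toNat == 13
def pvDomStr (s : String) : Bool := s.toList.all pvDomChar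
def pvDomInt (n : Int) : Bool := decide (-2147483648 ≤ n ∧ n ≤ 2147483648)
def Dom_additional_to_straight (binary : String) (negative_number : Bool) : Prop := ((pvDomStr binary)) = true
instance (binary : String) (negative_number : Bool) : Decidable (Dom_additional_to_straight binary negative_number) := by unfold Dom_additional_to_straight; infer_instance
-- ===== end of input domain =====

-- B replaces A's bit-inversion fold plus manual LSB-first ripple-increment loop by closed-form
-- arithmetic ((int(inverted,2)+1) mod 2^n, re-rendered in binary); objective: simpler.

-- ===== PORT A =====

-- temp[i] += d  (exact here: every access in A's loop is in range on the reachable states)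
def pvSetAdd (t : List Int) (i : Nat) (d : Int) : List Int := t.set i (t.getD i 0 + d)

-- A's second for-loop.  Python iterates the live list, but the loop only mutates indices
-- at or before the current position (counter tracks the position), so iterating the
-- snapshot of temp taken at loop entry is exact.
def additional_to_straight_loop : List Int → List Int → Bool → Nat → List Int
  | [], temp, _, _ => temp
  | number :: rest, temp, plus, counter =>
    if plus then
      if number = 0 then pvSetAdd temp counter 1          -- break
      else if number = 1 then
        let temp1 := pvSetAdd temp counter (-1)
        let counter1 := counter + 1
        if temp1.length < counter1 then
          additional_to_straight_loop rest (pvSetAdd temp1 counter1 1) false counter1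
        else additional_to_straight_loop rest temp1 plus counter1
      else additional_to_straight_loop rest temp plus counter
    else
      if number = 2 then
        let temp1 := pvSetAdd temp counter (-2)
        let counter1 := counter + 1
        if temp1.length < counter1 then
          additional_to_straight_loop rest (pvSetAdd temp1 counter1 1) false counter1
        else additional_to_straight_loop rest temp1 false counter1
      else additional_to_straight_loop rest temp false counter

def additional_to_straight (binary : String) (negative_number : Bool) : String :=
  let temp := PySem.Str.slice binary (some 1) none                  -- binary[1:]
  let straight := if negative_number then "1" else "0"
  let straight := temp.toList.foldl
      (fun s number => if number = '1' then s ++ "0" else s ++ "1") straight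
  -- int(number): exact, every char of straight[1:] here is '0' or '1' (a digit)
  let temp2 := (PySem.Str.slice straight (some 1) none).toList.map
      (fun c => (PySem.Int.ofStr? (String.ofList [c])).getD 0)
  let temp2 := temp2.reverse
  let temp2 := additional_to_straight_loop temp2 temp2 true 0
  let temp2 := temp2.reverse
  -- straight[0]: exact, straight is nonempty (it starts with the sign character)
  let straight0 := String.ofList [(PySem.Str.pyGet? straight 0).getD '0']
  temp2.foldl (fun s number => s ++ PySem.Int.toStr number) straight0

-- ===== PORT B =====

-- int(s, 2): exact here, Source B applies it to a nonempty string of '0'/'1' only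
def pvBitsVal (cs : List Char) : Nat :=
  cs.foldl (fun a c => 2 * a + (if c = '1' then 1 else 0)) 0

-- format(v, '0{n}b'): exact here, Source B applies it with v < 2^n
def pvBitsOfNat : Nat → Nat → List Char
  | 0, _ => []
  | n + 1, v => pvBitsOfNat n (v / 2) ++ [if v % 2 = 1 then '1' else '0']

def additional_to_straight_alt (binary : String) (negative_number : Bool) : String :=
  let sign := if negative_number then "1" else "0"
  let rest := PySem.Str.slice binary (some 1) none
  if rest.isEmpty then sign
  else
    let inverted := rest.toList.map (fun c => if c = '1' then '0' else '1')
    let n := inverted.length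
    let value := (pvBitsVal inverted + 1) % (2 ^ n)
    sign ++ String.ofList (pvBitsOfNat n value)

-- ===== PRECONDITION & SPEC =====
def Spec_additional_to_straight (binary : String) (negative_number : Bool) (out : String) : Prop := out = additional_to_straight_alt binary negative_number
instance (binary : String) (negative_number : Bool) (out : String) : Decidable (Spec_additional_to_straight binary negative_number out) := by unfold Spec_additional_to_straight; infer_instance

-- ===== CLAIM (what is proved, stated in full; the proofs are below) =====
def Claim_equal_additional_to_straight : Prop := ∀ (binary : String) (negative_number : Bool), Dom_additional_to_straight binary negative_number → Spec_additional_to_straight binary negative_number (additional_to_straight binary negative_number)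

-- ===== LEMMAS AND PROOFS =====

-- proof-only helpers
def pvBitC (ds : List Char) : Prop := ∀ c ∈ ds, c = '0' ∨ c = '1'

def pvChInt (c : Char) : Int := (PySem.Int.ofStr? (String.ofList [c])).getD 0
def pvDig (b : Int) : Char := if b = 0 then '0' else '1'

def pvRippleI : List Int → List Int
  | [] => []
  | b :: t => if b = 0 then 1 :: t else 0 :: pvRippleI t

def pvRippleC : List Char → List Char
  | [] => []
  | c :: t => if c = '0' then '1' :: t else '0' :: pvRippleC t

def pvValL : List Char → Nat
  | [] => 0
  | c :: t => (if c = '1' then 1 else 0) + 2 * pvValL t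

lemma pv_getD_append (pref : List Int) (x : Int) (t : List Int) (d : Int) :
    (pref ++ x :: t).getD pref.length d = x := by
  induction pref with
  | nil => rfl
  | cons a p ih => simpa using ih

lemma pv_set_append (pref : List Int) (x y : Int) (t : List Int) :
    (pref ++ x :: t).set pref.length y = pref ++ y :: t := by
  induction pref with
  | nil => rfl
  | cons a p ih => simpa using ih

lemma pv_loop_eq (bs : List Int) (pref : List Int)
    (h : ∀ b ∈ bs, b = 0 ∨ b = 1) :
    additional_to_straight_loop bs (pref ++ bs) true pref.length = pref ++ pvRippleI bs := by
  induction bs generalizing pref with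
  | nil => simp [additional_to_straight_loop, pvRippleI]
  | cons b t ih =>
    rcases h b (by simp) with h0 | h1
    · subst h0
      simp only [additional_to_straight_loop]
      norm_num [pvSetAdd, pv_getD_append, pv_set_append, pvRippleI]
    · subst h1
      have e1 : pvSetAdd (pref ++ (1:Int) :: t) pref.length (-1) = pref ++ (0:Int) :: t := by
        simp only [pvSetAdd, pv_getD_append, pv_set_append]
        norm_num
      have hnlt : ¬ (pref ++ (0:Int) :: t).length < pref.length + 1 := by simp
      have hstep : additional_to_straight_loop ((1:Int) :: t) (pref ++ 1 :: t) true pref.length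
          = additional_to_straight_loop t (pref ++ 0 :: t) true (pref.length + 1) := by
        simp only [additional_to_straight_loop]
        norm_num [e1, hnlt]
      have hrec := ih (pref ++ [(0:Int)]) (fun b hb => h b (by simp [hb]))
      rw [hstep, show pref ++ (0:Int) :: t = (pref ++ [0]) ++ t by simp,
        show pref.length + 1 = (pref ++ [(0:Int)]).length by simp, hrec]
      norm_num [pvRippleI]

lemma pv_fold_inv (rs : List Char) (s0 : String) :
    (rs.foldl (fun s number => if number = '1' then s ++ "0" else s ++ "1") s0).toList
      = s0.toList ++ rs.map (fun c => if c = '1' then '0' else '1') := by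
  induction rs generalizing s0 with
  | nil => simp
  | cons c t ih => by_cases hc : c = '1' <;> simp [hc, ih]

lemma pv_fold_dig (ts : List Int) (s0 : String) (h : ∀ b ∈ ts, b = 0 ∨ b = 1) :
    (ts.foldl (fun s number => s ++ PySem.Int.toStr number) s0).toList
      = s0.toList ++ ts.map pvDig := by
  induction ts generalizing s0 with
  | nil => simp
  | cons b t ih =>
    have hb := h b (by simp)
    have hds : (PySem.Int.toStr b).toList = [pvDig b] := by
      rcases hb with h0 | h1 <;> subst_vars <;> decide
    simp only [List.foldl, List.map]
    rw [ih _ (fun x hx => h x (by simp [hx]))]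
    simp [hds]

lemma pv_map_dig_chInt (ds : List Char) (h : pvBitC ds) :
    (ds.map pvChInt).map pvDig = ds := by
  induction ds with
  | nil => rfl
  | cons c t ih =>
    have hc := h c (by simp)
    have : pvDig (pvChInt c) = c := by rcases hc with h0 | h1 <;> subst_vars <;> decide
    simp only [List.map, this]
    rw [ih (fun x hx => h x (by simp [hx]))]

lemma pv_chInt_bits (ds : List Char) (h : pvBitC ds) :
    ∀ b ∈ ds.map pvChInt, b = 0 ∨ b = 1 := by
  intro b hb
  rcases List.mem_map.1 hb with ⟨c, hc, rfl⟩
  rcases h c hc with h0 | h1 <;> subst_vars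
  · left; decide
  · right; decide

lemma pv_rippleI_bits (bs : List Int) (h : ∀ b ∈ bs, b = 0 ∨ b = 1) :
    ∀ b ∈ pvRippleI bs, b = 0 ∨ b = 1 := by
  induction bs with
  | nil => exact h
  | cons b t ih =>
    by_cases hb : b = 0
    · subst hb
      intro x hx
      simp [pvRippleI] at hx
      rcases hx with rfl | hx
      · right; rfl
      · exact h x (by simp [hx])
    · intro x hx
      simp [pvRippleI, hb] at hx
      rcases hx with rfl | hx
      · left; rfl
      · exact ih (fun y hy => h y (by simp [hy])) x hx

lemma pv_rippleI_C (ds : List Char) (h : pvBitC ds) :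
    (pvRippleI (ds.map pvChInt)).map pvDig = pvRippleC ds := by
  induction ds with
  | nil => rfl
  | cons c t ih =>
    rcases h c (by simp) with h0 | h1 <;> subst_vars
    · have h0' : pvChInt '0' = 0 := by decide
      simp [pvRippleI, pvRippleC, h0', pv_map_dig_chInt t (fun x hx => h x (by simp [hx]))]
      decide
    · have h1' : pvChInt '1' = 1 := by decide
      simp [pvRippleI, pvRippleC, h1', ih (fun x hx => h x (by simp [hx]))]
      decide

lemma pv_rippleC_len (ds : List Char) : (pvRippleC ds).length = ds.length := by
  induction ds with
  | nil => rfl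
  | cons c t ih => by_cases hc : c = '0' <;> simp [pvRippleC, hc, ih]

lemma pv_rippleC_bits (ds : List Char) (h : pvBitC ds) : pvBitC (pvRippleC ds) := by
  induction ds with
  | nil => exact h
  | cons c t ih =>
    by_cases hc : c = '0'
    · subst hc
      intro x hx
      simp [pvRippleC] at hx
      rcases hx with rfl | hx
      · right; rfl
      · exact h x (by simp [hx])
    · intro x hx
      simp [pvRippleC, hc] at hx
      rcases hx with rfl | hx
      · left; rfl
      · exact ih (fun y hy => h y (by simp [hy])) x hx

lemma pv_bitsVal_append (cs : List Char) (c : Char) :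
    pvBitsVal (cs ++ [c]) = 2 * pvBitsVal cs + (if c = '1' then 1 else 0) := by
  simp [pvBitsVal, List.foldl_append]

lemma pv_valL_rev (ls : List Char) : pvValL ls = pvBitsVal ls.reverse := by
  induction ls with
  | nil => rfl
  | cons c t ih => simp [pvValL, ih, pv_bitsVal_append]; ring

lemma pv_valL_lt (ds : List Char) : pvValL ds < 2 ^ ds.length := by
  induction ds with
  | nil => simp [pvValL]
  | cons c t ih =>
    simp only [pvValL, List.length_cons, pow_succ]
    by_cases hc : c = '1' <;> simp [hc] <;> omega

lemma pv_valL_ripple (ds : List Char) (h : pvBitC ds) :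
    pvValL (pvRippleC ds) = (pvValL ds + 1) % 2 ^ ds.length := by
  induction ds with
  | nil => rfl
  | cons c t ih =>
    rcases h c (by simp) with h0 | h1 <;> subst_vars
    · have hlt := pv_valL_lt t
      have e1 : pvValL (pvRippleC ('0' :: t)) = 1 + 2 * pvValL t := by
        simp [pvRippleC, pvValL]
      have e2 : pvValL ('0' :: t) = 2 * pvValL t := by simp [pvValL]
      rw [e1, e2, List.length_cons, pow_succ,
        Nat.mod_eq_of_lt (show 2 * pvValL t + 1 < 2 ^ t.length * 2 by omega)]
      omega
    · have e1 : pvValL (pvRippleC ('1' :: t)) = 2 * pvValL (pvRippleC t) := by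
        simp [pvRippleC, pvValL]
      have e2 : pvValL ('1' :: t) = 1 + 2 * pvValL t := by simp [pvValL]
      rw [e1, e2, ih (fun x hx => h x (by simp [hx])), List.length_cons, pow_succ,
        show 1 + 2 * pvValL t + 1 = 2 * (pvValL t + 1) by ring,
        mul_comm ((2:ℕ) ^ t.length) 2, Nat.mul_mod_mul_left]

lemma pv_bitsOfNat_val (cs : List Char) (h : pvBitC cs) :
    pvBitsOfNat cs.length (pvBitsVal cs) = cs := by
  induction cs using List.reverseRecOn with
  | nil => rfl
  | append_singleton ys c ih =>
    have hc := h c (by simp)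
    have hbit : (if c = '1' then 1 else 0) ≤ 1 := by split <;> omega
    rw [pv_bitsVal_append]
    have hlen : (ys ++ [c]).length = ys.length + 1 := by simp
    rw [hlen]
    show pvBitsOfNat ys.length ((2 * pvBitsVal ys + _) / 2) ++ _ = _
    have hdiv : (2 * pvBitsVal ys + (if c = '1' then 1 else 0)) / 2 = pvBitsVal ys := by
      omega
    have hmod : (2 * pvBitsVal ys + (if c = '1' then 1 else 0)) % 2
        = (if c = '1' then 1 else 0) := by omega
    rw [hdiv, hmod, ih (fun x hx => h x (by simp [hx]))]
    rcases hc with h0 | h1 <;> subst_vars <;> simp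

lemma pv_string_eq_of_toList {a b : String} (h : a.toList = b.toList) : a = b := by
  have := congrArg String.ofList h
  simpa using this

-- ===== VERDICT (by name: the statement is the Claim_ definition above) =====
theorem additional_to_straight_spec : Claim_equal_additional_to_straight := by
  intro binary negative_number _
  unfold Spec_additional_to_straight additional_to_straight additional_to_straight_alt
  simp only []
  apply pv_string_eq_of_toList
  set rs := PySem.Str.slice binary (some 1) none with hrs
  set sc : Char := if negative_number then '1' else '0' with hsc
  set cs : List Char := rs.toList.map (fun c => if c = '1' then '0' else '1') with hcs
  have hbits : pvBitC cs := by
    intro c hc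
    rcases List.mem_map.1 hc with ⟨x, _, rfl⟩
    by_cases hx : x = '1' <;> simp [hx]
  have hsign : (if negative_number then "1" else "0").toList = [sc] := by
    cases negative_number <;> simp [hsc]
  have hstraight : (rs.toList.foldl
      (fun s number => if number = '1' then s ++ "0" else s ++ "1")
      (if negative_number then "1" else "0")).toList = sc :: cs := by
    rw [pv_fold_inv, hsign, hcs]
    rfl
  set straight := rs.toList.foldl
      (fun s number => if number = '1' then s ++ "0" else s ++ "1")
      (if negative_number then "1" else "0") with hstr
  have htail : (PySem.Str.slice straight (some 1) none).toList = cs := by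
    simp [PySem.Str.toList_slice, PySem.List.slice_from_one, hstraight]
  have hget : (PySem.Str.pyGet? straight 0).getD '0' = sc := by
    have h0 : ((0:Int)) = ((0:Nat):Int) := by norm_num
    rw [h0, PySem.Str.pyGet?_natCast, hstraight]
    rfl
  rw [htail, hget]
  have hlam : (fun c => (PySem.Int.ofStr? (String.ofList [c])).getD 0) = pvChInt := rfl
  rw [hlam]
  have hbitsI : ∀ b ∈ (cs.map pvChInt).reverse, b = 0 ∨ b = 1 := by
    intro b hb
    exact pv_chInt_bits cs hbits b (List.mem_reverse.1 hb)
  have hloop : additional_to_straight_loop ((cs.map pvChInt).reverse)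
      ((cs.map pvChInt).reverse) true 0 = pvRippleI ((cs.map pvChInt).reverse) := by
    have := pv_loop_eq ((cs.map pvChInt).reverse) [] hbitsI
    simpa using this
  rw [hloop]
  have hts : ∀ b ∈ (pvRippleI ((cs.map pvChInt).reverse)).reverse, b = 0 ∨ b = 1 := by
    intro b hb
    exact pv_rippleI_bits _ hbitsI b (List.mem_reverse.1 hb)
  rw [pv_fold_dig _ _ hts]
  have hAmap : (pvRippleI ((cs.map pvChInt).reverse)).reverse.map pvDig
      = (pvRippleC cs.reverse).reverse := by
    have h1 : (cs.map pvChInt).reverse = cs.reverse.map pvChInt := by simp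
    rw [List.map_reverse, h1,
      pv_rippleI_C cs.reverse (fun x hx => hbits x (List.mem_reverse.1 hx))]
  rw [hAmap]
  -- A side is now [sc] ++ (pvRippleC cs.reverse).reverse; compute the B side
  by_cases hemp : rs.toList = []
  · have : rs.isEmpty = true := by
      rw [String.isEmpty_iff]
      exact String.toList_inj.mp (by simpa using hemp)
    rw [if_pos this]
    have : cs = [] := by simp [hcs, hemp]
    simp [this, hsign, pvRippleC]
  · have : rs.isEmpty = false := by
      by_contra hcon
      have htr : rs.isEmpty = true := by revert hcon; cases rs.isEmpty <;> simp
      exact hemp (by simp [String.isEmpty_iff.mp htr])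
    rw [this]
    simp only [Bool.false_eq_true, if_false]
    have hBval : pvBitsOfNat cs.length ((pvBitsVal cs + 1) % 2 ^ cs.length)
        = (pvRippleC cs.reverse).reverse := by
      set es := (pvRippleC cs.reverse).reverse with hes
      have hlen : es.length = cs.length := by simp [hes, pv_rippleC_len]
      have hesbits : pvBitC es := by
        intro x hx
        exact pv_rippleC_bits cs.reverse (fun y hy => hbits y (List.mem_reverse.1 hy)) x
          (List.mem_reverse.1 hx)
      have hval : pvBitsVal es = (pvBitsVal cs + 1) % 2 ^ cs.length := by
        have h1 : pvValL es.reverse = pvBitsVal es := by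
          rw [pv_valL_rev, List.reverse_reverse]
        have h2 : es.reverse = pvRippleC cs.reverse := by simp [hes]
        rw [← h1, h2, pv_valL_ripple cs.reverse
            (fun y hy => hbits y (List.mem_reverse.1 hy)),
          pv_valL_rev, List.reverse_reverse, List.length_reverse]
      rw [← hval, ← hlen, pv_bitsOfNat_val es hesbits]
    rw [hcs] at hBval ⊢
    rw [hBval]
    cases negative_number <;> simp [hsc]
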